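-- pv_equiv track=rewrite | github.com/conjuncts/gmft | gmft/reformat/step/restructure.py | adjust_indices
-- ===== SOURCE A (Python) =====
-- def adjust_indices(sorted_indices, sorted_to_remove):
--     """
--     indices: list of sorted indices to adjust
--     to_remove: list of sorted indices being removed from the array
--     Returns: adjusted indices
--     """
--     if not all(
--         sorted_indices[i] <= sorted_indices[i + 1]
--         for i in range(len(sorted_indices) - 1)
--     ):
--         raise ValueError("sorted_indices must be sorted in ascending order")
--     if not all(
--         sorted_to_remove[i] <= sorted_to_remove[i + 1]
--         for i in range(len(sorted_to_remove) - 1)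
--     ):
--         raise ValueError("sorted_to_remove must be sorted in ascending order")
--
--     adjusted = []
--     i = j = shift = 0
--
--     while i < len(sorted_indices):
--         while j < len(sorted_to_remove) and sorted_to_remove[j] < sorted_indices[i]:
--             shift += 1
--             j += 1
--         adjusted.append(sorted_indices[i] - shift)
--         i += 1
--
--     return adjusted
-- ===== SOURCE B (Python) =====
-- import bisect
--
--
-- def adjust_indices(sorted_indices, sorted_to_remove):
--     """
--     indices: list of sorted indices to adjust
--     to_remove: list of sorted indices being removed from the array
--     Returns: adjusted indices
--     """
--     if not all(
--         sorted_indices[i] <= sorted_indices[i + 1]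
--         for i in range(len(sorted_indices) - 1)
--     ):
--         raise ValueError("sorted_indices must be sorted in ascending order")
--     if not all(
--         sorted_to_remove[i] <= sorted_to_remove[i + 1]
--         for i in range(len(sorted_to_remove) - 1)
--     ):
--         raise ValueError("sorted_to_remove must be sorted in ascending order")
--
--     # each index shifts down by the number of removed positions strictly below it
--     return [x - bisect.bisect_left(sorted_to_remove, x) for x in sorted_indices]
-- ===== Notes on version B (the rewrite author's own statement) =====
-- stated objective: idiomatic
-- what changed: Replaces the stateful two-pointer merge (indices i, j and a running shift) by a list comprehension that, for each index x, subtracts bisect.bisect_left(sorted_to_remove, x) -- the count of removed positions strictly below x -- keeping the sortedness guards verbatim.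
import Mathlib
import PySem

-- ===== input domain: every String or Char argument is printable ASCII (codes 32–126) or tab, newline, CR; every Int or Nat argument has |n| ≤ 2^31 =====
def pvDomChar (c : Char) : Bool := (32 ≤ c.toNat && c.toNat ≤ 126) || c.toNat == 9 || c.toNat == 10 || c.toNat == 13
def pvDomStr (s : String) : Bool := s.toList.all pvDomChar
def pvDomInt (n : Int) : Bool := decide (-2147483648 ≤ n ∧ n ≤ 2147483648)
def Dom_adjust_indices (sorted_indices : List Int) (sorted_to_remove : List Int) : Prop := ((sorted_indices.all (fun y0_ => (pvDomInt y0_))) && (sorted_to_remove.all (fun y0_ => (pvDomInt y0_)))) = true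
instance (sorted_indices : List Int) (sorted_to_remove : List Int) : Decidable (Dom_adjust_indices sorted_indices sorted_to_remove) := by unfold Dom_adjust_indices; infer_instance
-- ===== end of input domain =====

-- B replaces A's two-pointer merge by a per-element count of removed positions strictly
-- below each index (same ValueError guards); equal return values on sorted inputs (Pre_).

-- ===== PORT A =====
-- inner `while j < len(sorted_to_remove) and sorted_to_remove[j] < sorted_indices[i]` loop:
-- advances over the remaining to-remove list, incrementing shift
def advA (x : Int) : List Int → Int → (List Int × Int)
  | [], shift => ([], shift)
  | r :: rs, shift => if r < x then advA x rs (shift + 1) else (r :: rs, shift)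

-- outer `while i < len(sorted_indices)` loop, appending sorted_indices[i] - shift
def goA : List Int → List Int → Int → List Int
  | [], _, _ => []
  | x :: xs, rem, shift =>
      let p := advA x rem shift
      (x - p.2) :: goA xs p.1 p.2

-- the two ValueError guards raise exactly on inputs excluded by Pre_adjust_indices
def adjust_indices (sorted_indices : List Int) (sorted_to_remove : List Int) : List Int :=
  goA sorted_indices sorted_to_remove 0

-- ===== PORT B =====
-- CPython's bisect.bisect_left(a, x): lo/hi halving loop; the fuel argument is only a
-- totality guard (hi - lo shrinks every iteration, so fuel = a.length always suffices)
def blGo (a : List Int) (x : Int) : Nat → Nat → Nat → Nat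
  | 0, lo, _ => lo
  | fuel + 1, lo, hi =>
    if lo < hi then
      let mid := (lo + hi) / 2
      if a.getD mid 0 < x then blGo a x fuel (mid + 1) hi else blGo a x fuel lo mid
    else lo

def bisectLeft (a : List Int) (x : Int) : Nat := blGo a x a.length 0 a.length

-- the list comprehension of Source B (same guards, excluded by Pre_ as for A)
def adjust_indices_alt (sorted_indices : List Int) (sorted_to_remove : List Int) : List Int :=
  sorted_indices.map (fun x => x - (bisectLeft sorted_to_remove x : Int))

-- ===== PRECONDITION & SPEC =====
-- Pre_ excludes exactly the inputs where both Pythons raise ValueError: a list not sorted ascending.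
def Pre_adjust_indices (sorted_indices : List Int) (sorted_to_remove : List Int) : Prop :=
  List.Pairwise (· ≤ ·) sorted_indices ∧ List.Pairwise (· ≤ ·) sorted_to_remove
instance (sorted_indices : List Int) (sorted_to_remove : List Int) : Decidable (Pre_adjust_indices sorted_indices sorted_to_remove) := by unfold Pre_adjust_indices; infer_instance
def pvWitness_adjust_indices : List Int × List Int := ([1, 3, 5], [2, 3])

def Spec_adjust_indices (sorted_indices : List Int) (sorted_to_remove : List Int) (out : List Int) : Prop := out = adjust_indices_alt sorted_indices sorted_to_remove
instance (sorted_indices : List Int) (sorted_to_remove : List Int) (out : List Int) : Decidable (Spec_adjust_indices sorted_indices sorted_to_remove out) := by unfold Spec_adjust_indices; infer_instance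

-- ===== CLAIM (what is proved, stated in full; the proofs are below) =====
def Claim_equal_adjust_indices : Prop := ∀ (sorted_indices : List Int) (sorted_to_remove : List Int), Dom_adjust_indices sorted_indices sorted_to_remove → Pre_adjust_indices sorted_indices sorted_to_remove → Spec_adjust_indices sorted_indices sorted_to_remove (adjust_indices sorted_indices sorted_to_remove)

-- ===== LEMMAS AND PROOFS =====

-- A's inner while loop computes (dropWhile, shift + |takeWhile|)
theorem advA_eq (x : Int) (l : List Int) : ∀ (shift : Int),
    advA x l shift = (l.dropWhile (fun r => decide (r < x)),
      shift + ((l.takeWhile (fun r => decide (r < x))).length : Int)) := by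
  induction l with
  | nil => intro shift; simp [advA]
  | cons r rs ih =>
    intro shift
    by_cases h : r < x
    · simp [advA, h, ih]
      ring
    · simp [advA, h]

-- on a sorted list, |takeWhile (< x)| = countP (< x)
theorem takeWhile_length_eq_countP (x : Int) (l : List Int)
    (hl : List.Pairwise (· ≤ ·) l) :
    (l.takeWhile (fun r => decide (r < x))).length = l.countP (fun r => decide (r < x)) := by
  induction l with
  | nil => simp
  | cons r rs ih =>
    rcases hl with _ | ⟨hr, hrs⟩
    by_cases h : r < x
    · simp [h, ih hrs]
    · simp only [List.takeWhile_cons, h, decide_false, List.countP_cons]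
      have hz : rs.countP (fun r => decide (r < x)) = 0 := by
        rw [List.countP_eq_zero]
        intro a ha
        have : r ≤ a := hr a ha
        simp; omega
      simp [hz]

-- every element of dropWhile (< x) of a sorted list fails (< x)
theorem dropWhile_not_lt (x : Int) (l : List Int) (hl : List.Pairwise (· ≤ ·) l) :
    ∀ a ∈ l.dropWhile (fun r => decide (r < x)), ¬ a < x := by
  induction l with
  | nil => simp
  | cons r rs ih =>
    rcases hl with _ | ⟨hr, hrs⟩
    by_cases h : r < x
    · simpa [List.dropWhile_cons, h] using ih hrs
    · intro a ha
      simp only [List.dropWhile_cons, h, decide_false] at ha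
      rcases List.mem_cons.mp ha with rfl | ha
      · exact h
      · have := hr a ha; omega

-- on a sorted list, position i holds an element < x iff i < countP (< x)
theorem sorted_lt_iff_lt_countP (x : Int) (l : List Int) (hl : List.Pairwise (· ≤ ·) l)
    (i : Nat) (hi : i < l.length) :
    (l.getD i 0 < x ↔ i < l.countP (fun r => decide (r < x))) := by
  rw [← takeWhile_length_eq_countP x l hl]
  set tw := l.takeWhile (fun r => decide (r < x)) with htw
  set dw := l.dropWhile (fun r => decide (r < x)) with hdw
  have hsplit : l = tw ++ dw := (List.takeWhile_append_dropWhile).symm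
  rw [List.getD_eq_getElem l 0 hi]
  have hlen : l.length = tw.length + dw.length := by rw [hsplit, List.length_append]
  have h2 := List.getElem_of_eq hsplit hi
  by_cases hcase : i < tw.length
  · have hm : l[i] ∈ tw := by
      rw [h2, List.getElem_append_left hcase]; exact List.getElem_mem _
    have hlt := List.mem_takeWhile_imp hm
    simp only [decide_eq_true_eq] at hlt
    exact ⟨fun _ => hcase, fun _ => hlt⟩
  · have hm : l[i] ∈ dw := by
      rw [h2, List.getElem_append_right (by omega : tw.length ≤ i)]; exact List.getElem_mem _
    have hnot := dropWhile_not_lt x l hl _ hm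
    exact ⟨fun h => absurd h hnot, fun h => absurd h (by omega)⟩

-- the halving loop returns k when lo ≤ k ≤ hi and position i is < x iff i < k
theorem blGo_eq (a : List Int) (x : Int) (k : Nat)
    (hk : ∀ i, i < a.length → (a.getD i 0 < x ↔ i < k)) :
    ∀ fuel lo hi, hi - lo ≤ fuel → lo ≤ k → k ≤ hi → hi ≤ a.length → blGo a x fuel lo hi = k := by
  intro fuel
  induction fuel with
  | zero => intro lo hi hf hlo hhi _; simp only [blGo]; omega
  | succ fuel ih =>
    intro lo hi hf hlo hhi hlen
    simp only [blGo]
    by_cases h : lo < hi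
    · simp only [h, if_pos]
      have hmid : (lo + hi) / 2 < a.length := by omega
      by_cases hv : a.getD ((lo + hi) / 2) 0 < x
      · have := (hk _ hmid).mp hv
        simp only [hv, if_pos]
        exact ih _ _ (by omega) (by omega) hhi hlen
      · have hkle : ¬ (lo + hi) / 2 < k := fun hc => hv ((hk _ hmid).mpr hc)
        simp only [hv, if_neg, not_false_iff]
        exact ih _ _ (by omega) hlo (by omega) (by omega)
    · simp only [h, if_neg, not_false_iff]
      omega

theorem bisectLeft_eq_countP (x : Int) (l : List Int) (hl : List.Pairwise (· ≤ ·) l) :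
    bisectLeft l x = l.countP (fun r => decide (r < x)) := by
  have hkle : l.countP (fun r => decide (r < x)) ≤ l.length := List.countP_le_length
  exact blGo_eq l x _ (sorted_lt_iff_lt_countP x l hl) l.length 0 l.length (by omega) (by omega) hkle le_rfl


theorem goA_eq (xs : List Int) : ∀ (rem : List Int) (shift : Int),
    List.Pairwise (· ≤ ·) xs → List.Pairwise (· ≤ ·) rem →
    goA xs rem shift = xs.map (fun x => x - (shift + (rem.countP (fun r => decide (r < x)) : Int))) := by
  induction xs with
  | nil => intro rem shift _ _; simp [goA]
  | cons x xs ih =>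
    intro rem shift hxs hrem
    rcases hxs with _ | ⟨hx, hxs⟩
    have hdrop : List.Pairwise (· ≤ ·) (rem.dropWhile (fun r => decide (r < x))) :=
      hrem.sublist (List.dropWhile_sublist _)
    have hsplit := List.takeWhile_append_dropWhile (p := fun r => decide (r < x)) (l := rem)
    simp only [goA, advA_eq, takeWhile_length_eq_countP x rem hrem,
      ih _ _ hxs hdrop, List.map_cons, List.cons.injEq]
    refine ⟨trivial, ?_⟩
    apply List.map_congr_left
    intro x' hx'
    have hxx' : x ≤ x' := hx x' hx'
    have hcnt : rem.countP (fun r => decide (r < x')) =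
        rem.countP (fun r => decide (r < x)) +
        (rem.dropWhile (fun r => decide (r < x))).countP (fun r => decide (r < x')) := by
      conv_lhs => rw [← hsplit]
      rw [List.countP_append]
      congr 1
      rw [← takeWhile_length_eq_countP x rem hrem]
      rw [List.countP_eq_length]
      intro a ha
      have : a < x := by simpa using List.mem_takeWhile_imp ha
      simp; omega
    rw [hcnt]; push_cast; ring

-- ===== VERDICT (by name: the statement is the Claim_ definition above) =====
theorem adjust_indices_spec : Claim_equal_adjust_indices := by
  intro si sr _ hpre
  unfold Spec_adjust_indices adjust_indices adjust_indices_alt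
  rw [goA_eq si sr 0 hpre.1 hpre.2]
  apply List.map_congr_left
  intro x _
  rw [bisectLeft_eq_countP x sr hpre.2]; ring
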